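-- pv_equiv track=rewrite | github.com/TGM-HWI-SWP/lagerverwaltung-autozuhandler | src/services/formatting_service.py | normalize_db_list
-- ===== SOURCE A (Python) =====
-- def safe_str(value: object | None) -> str:
--     return "" if value is None else str(value).strip()
--
-- def normalize_db_list(values: list[object]) -> list[str]:
--     seen: set[str] = set()
--     result: list[str] = []
--
--     for value in values:
--         normalized = safe_str(value)
--         if normalized and normalized.lower() not in seen:
--             seen.add(normalized.lower())
--             result.append(normalized)
--
--     result.sort(key=lambda x: x.lower())
--     return result
-- ===== SOURCE B (Python) =====
-- def safe_str(value):
--     return "" if value is None else str(value).strip()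
--
--
-- def normalize_db_list(values):
--     # Collect non-empty normalized values in input order, stable-sort by
--     # lowercase key, then drop adjacent duplicates (same lowercase key).
--     cleaned = [s for s in (safe_str(v) for v in values) if s]
--     cleaned.sort(key=str.lower)
--     out = []
--     prev = None
--     for s in cleaned:
--         low = s.lower()
--         if low != prev:
--             out.append(s)
--             prev = low
--     return out
-- ===== Notes on version B (the rewrite author's own statement) =====
-- stated objective: alternative
-- what changed: Replaces the seen-set membership dedup followed by a sort with: filter non-empty strips, stable sort by lowercase key, then a single adjacent-deduplication pass (no set is kept); stability makes the first-seen casing survive per lowercase group.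
import Mathlib
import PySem

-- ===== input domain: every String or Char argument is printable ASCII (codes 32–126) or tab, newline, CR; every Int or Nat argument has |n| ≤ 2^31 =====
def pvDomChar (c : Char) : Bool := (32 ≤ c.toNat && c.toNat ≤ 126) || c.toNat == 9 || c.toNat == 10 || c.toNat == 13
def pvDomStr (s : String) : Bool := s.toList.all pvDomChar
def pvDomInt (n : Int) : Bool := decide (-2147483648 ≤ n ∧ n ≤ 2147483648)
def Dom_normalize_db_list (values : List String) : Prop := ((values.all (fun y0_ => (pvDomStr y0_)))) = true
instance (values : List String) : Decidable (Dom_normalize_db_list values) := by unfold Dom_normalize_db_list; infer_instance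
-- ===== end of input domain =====

-- B replaces A's seen-set dedup-then-sort by filter, stable sort by lowercase key, then one
-- adjacent-deduplication pass (alternative decomposition, same asymptotic cost).

-- ===== PORT A =====
def normalize_db_list (values : List String) : List String :=
  let st := values.foldl
    (fun (st : PySem.Set String × List String) value =>
      let normalized := PySem.Str.strip value
      if normalized ≠ "" ∧ (PySem.Set.contains st.1 (PySem.Str.lower normalized)) = false then
        (PySem.Set.add st.1 (PySem.Str.lower normalized), st.2 ++ [normalized])
      else st)
    (PySem.Set.empty, [])
  PySem.List.sorted st.2 (fun x => PySem.Str.lower x)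

-- ===== PORT B =====
-- the adjacent-dedup loop of Source B: prev is the lowercase key of the last kept element (none at start)
def pvDedupGo : Option String → List String → List String
  | _, [] => []
  | prev, s :: t =>
      if some (PySem.Str.lower s) = prev then pvDedupGo prev t
      else s :: pvDedupGo (some (PySem.Str.lower s)) t

def normalize_db_list_alt (values : List String) : List String :=
  let cleaned := values.filterMap
    (fun v => let s := PySem.Str.strip v; if s = "" then none else some s)
  pvDedupGo none (PySem.List.sorted cleaned (fun x => PySem.Str.lower x))

-- ===== PRECONDITION & SPEC =====
def Spec_normalize_db_list (values : List String) (out : List String) : Prop := out = normalize_db_list_alt values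
instance (values : List String) (out : List String) : Decidable (Spec_normalize_db_list values out) := by unfold Spec_normalize_db_list; infer_instance

-- ===== CLAIM (what is proved, stated in full; the proofs are below) =====
def Claim_equal_normalize_db_list : Prop := ∀ (values : List String), Dom_normalize_db_list values → Spec_normalize_db_list values (normalize_db_list values)

-- ===== LEMMAS AND PROOFS =====

-- first-occurrence dedup by lowercase key, seen keys carried as a list (proof device)
def pvDdf : List String → List String → List String
  | _, [] => []
  | ks, x :: t =>
      if PySem.Str.lower x ∈ ks then pvDdf ks t
      else x :: pvDdf (ks ++ [PySem.Str.lower x]) t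

-- named forms (definitionally equal to the inline lambdas of the ports) used by the proofs
def pvStep (st : PySem.Set String × List String) (value : String) : PySem.Set String × List String :=
  if PySem.Str.strip value ≠ "" ∧
      (PySem.Set.contains st.1 (PySem.Str.lower (PySem.Str.strip value))) = false then
    (PySem.Set.add st.1 (PySem.Str.lower (PySem.Str.strip value)), st.2 ++ [PySem.Str.strip value])
  else st

def pvClean (values : List String) : List String :=
  values.filterMap (fun v => if PySem.Str.strip v = "" then none else some (PySem.Str.strip v))

-- A's loop is pvDdf over the filtered list
theorem pvA_loop : ∀ (values : List String) (seen : PySem.Set String) (res : List String),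
    (values.foldl pvStep (seen, res)).2 = res ++ pvDdf seen (pvClean values) := by
  intro values
  induction values with
  | nil => intro seen res; simp [pvClean, pvDdf]
  | cons v t ih =>
    intro seen res
    by_cases h0 : PySem.Str.strip v = ""
    · have hstep : pvStep (seen, res) v = (seen, res) := by simp [pvStep, h0]
      have hclean : pvClean (v :: t) = pvClean t := by simp [pvClean, h0]
      rw [List.foldl_cons, hstep, hclean, ih]
    · have hclean : pvClean (v :: t) = PySem.Str.strip v :: pvClean t := by
        simp [pvClean, h0]
      by_cases hm : PySem.Str.lower (PySem.Str.strip v) ∈ seen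
      · have hc : PySem.Set.contains seen (PySem.Str.lower (PySem.Str.strip v)) = true :=
          (PySem.Set.contains_iff _ _).mpr hm
        have hstep : pvStep (seen, res) v = (seen, res) := by
          unfold pvStep
          rw [if_neg]
          rintro ⟨-, hcf⟩
          rw [hc] at hcf
          exact absurd hcf (by simp)
        rw [List.foldl_cons, hstep, hclean, ih, pvDdf, if_pos hm]
      · have hc : PySem.Set.contains seen (PySem.Str.lower (PySem.Str.strip v)) = false := by
          cases hcc : PySem.Set.contains seen (PySem.Str.lower (PySem.Str.strip v)) with
          | false => rfl
          | true => exact absurd ((PySem.Set.contains_iff _ _).mp hcc) hm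
        have hstep : pvStep (seen, res) v
            = (seen ++ [PySem.Str.lower (PySem.Str.strip v)], res ++ [PySem.Str.strip v]) := by
          simp [pvStep, h0, hm, PySem.Set.add]
        rw [List.foldl_cons, hstep, hclean, ih, pvDdf, if_neg hm]
        simp

theorem pvDdf_sublist : ∀ (l ks : List String), (pvDdf ks l).Sublist l := by
  intro l
  induction l with
  | nil => intro ks; simp [pvDdf]
  | cons x t ih =>
    intro ks
    by_cases h : PySem.Str.lower x ∈ ks
    · simp only [pvDdf, if_pos h]; exact (ih ks).cons x
    · simp only [pvDdf, if_neg h]; exact (ih (ks ++ [PySem.Str.lower x])).cons₂ x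

theorem pvDdf_not_mem_keys : ∀ (l ks : List String) (x : String),
    x ∈ pvDdf ks l → PySem.Str.lower x ∉ ks := by
  intro l
  induction l with
  | nil => intro ks x hx; simp [pvDdf] at hx
  | cons a t ih =>
    intro ks x hx
    by_cases h : PySem.Str.lower a ∈ ks
    · exact ih ks x (by simpa [pvDdf, if_pos h] using hx)
    · rcases (by simpa [pvDdf, if_neg h] using hx : x = a ∨ x ∈ pvDdf (ks ++ [PySem.Str.lower a]) t) with h1 | h1
      · subst h1; exact h
      · intro hk; exact ih _ x h1 (by simp [hk])

-- on a key-sorted list, pvDdf keys strictly increase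
theorem pvDdf_pairwise_lt : ∀ (l : List String),
    l.Pairwise (fun a b => PySem.Str.lower a ≤ PySem.Str.lower b) →
    ∀ ks, (pvDdf ks l).Pairwise (fun a b => PySem.Str.lower a < PySem.Str.lower b) := by
  intro l
  induction l with
  | nil => intro _ ks; simp [pvDdf]
  | cons x t ih =>
    intro hp ks
    have hp' := List.pairwise_cons.mp hp
    by_cases h : PySem.Str.lower x ∈ ks
    · simpa [pvDdf, if_pos h] using ih hp'.2 ks
    · simp only [pvDdf, if_neg h]
      refine List.pairwise_cons.mpr ⟨?_, ih hp'.2 _⟩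
      intro y hy
      have hle : PySem.Str.lower x ≤ PySem.Str.lower y :=
        hp'.1 y ((pvDdf_sublist t _).mem hy)
      have hne : PySem.Str.lower y ≠ PySem.Str.lower x := by
        intro he
        exact pvDdf_not_mem_keys t _ y hy (by simp [he])
      exact lt_of_le_of_ne hle (fun he => hne he.symm)

theorem pvDdf_map_nodup : ∀ (l ks : List String),
    ((pvDdf ks l).map (fun s => PySem.Str.lower s)).Nodup := by
  intro l
  induction l with
  | nil => intro ks; simp [pvDdf]
  | cons x t ih =>
    intro ks
    by_cases h : PySem.Str.lower x ∈ ks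
    · simpa [pvDdf, if_pos h] using ih ks
    · simp only [pvDdf, if_neg h, List.map_cons, List.nodup_cons]
      refine ⟨?_, ih _⟩
      intro hx
      rcases List.mem_map.mp hx with ⟨y, hy, he⟩
      exact pvDdf_not_mem_keys t _ y hy (by simp [he])

-- membership characterisation: pvDdf keeps exactly the first element of each unseen key
theorem pvMem_ddf : ∀ (l ks : List String) (x : String),
    x ∈ pvDdf ks l ↔ (PySem.Str.lower x ∉ ks ∧
      l.find? (fun s => PySem.Str.lower s == PySem.Str.lower x) = some x) := by
  intro l
  induction l with
  | nil => intro ks x; simp [pvDdf]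
  | cons a t ih =>
    intro ks x
    by_cases hk : PySem.Str.lower a ∈ ks
    · by_cases he : PySem.Str.lower a = PySem.Str.lower x
      · rw [pvDdf, if_pos hk, List.find?_cons_of_pos (by simp [he]), ih]
        constructor
        · rintro ⟨hxk, _⟩; exact absurd (he ▸ hk) hxk
        · rintro ⟨hxk, hfa⟩
          have : a = x := by simpa using hfa
          exact absurd (he ▸ hk) (this ▸ hxk)
      · rw [pvDdf, if_pos hk, List.find?_cons_of_neg (by simp [he]), ih]
    · by_cases he : PySem.Str.lower a = PySem.Str.lower x
      · rw [pvDdf, if_neg hk, List.find?_cons_of_pos (by simp [he])]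
        constructor
        · intro hx
          rcases List.mem_cons.mp hx with h1 | h1
          · subst h1; exact ⟨he ▸ hk, rfl⟩
          · have := pvDdf_not_mem_keys t _ x h1
            exact absurd (by simp [he]) this
        · rintro ⟨hxk, hfa⟩
          have : a = x := by simpa using hfa
          exact List.mem_cons.mpr (Or.inl this.symm)
      · rw [pvDdf, if_neg hk, List.find?_cons_of_neg (by simp [he])]
        constructor
        · intro hx
          rcases List.mem_cons.mp hx with h1 | h1
          · subst h1; exact absurd rfl he
          · rcases (ih _ x).mp h1 with ⟨hxk, hf⟩
            refine ⟨fun hmem => hxk (by simp [hmem]), hf⟩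
        · rintro ⟨hxk, hf⟩
          refine List.mem_cons.mpr (Or.inr ((ih _ x).mpr ⟨?_, hf⟩))
          simp only [List.mem_append, List.mem_singleton]
          rintro (h1 | h1)
          · exact hxk h1
          · exact he h1.symm

-- a key-sorted list with all keys above k has no k-match
theorem pvFind_none_of_gt (k : String) : ∀ (ys : List String),
    (∀ y ∈ ys, k < PySem.Str.lower y) →
    ys.find? (fun s => PySem.Str.lower s == k) = none := by
  intro ys h
  rw [List.find?_eq_none]
  intro y hy
  simp only [beq_iff_eq]
  exact ne_of_gt (h y hy)

theorem pvPairwise_insertBy (x : String) : ∀ (ys : List String),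
    ys.Pairwise (fun a b => PySem.Str.lower a ≤ PySem.Str.lower b) →
    (PySem.List.insertBy (fun a b => decide (PySem.Str.lower a < PySem.Str.lower b)) x ys).Pairwise
      (fun a b => PySem.Str.lower a ≤ PySem.Str.lower b) := by
  intro ys
  induction ys with
  | nil => intro _; simp [PySem.List.insertBy]
  | cons y t ih =>
    intro hp
    have hp' := List.pairwise_cons.mp hp
    by_cases hb : PySem.Str.lower x < PySem.Str.lower y
    · rw [show PySem.List.insertBy (fun a b => decide (PySem.Str.lower a < PySem.Str.lower b)) x (y :: t)
          = x :: y :: t by simp [PySem.List.insertBy, hb]]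
      refine List.pairwise_cons.mpr ⟨?_, hp⟩
      intro z hz
      rcases List.mem_cons.mp hz with h1 | h1
      · exact le_of_lt (h1 ▸ hb)
      · exact le_of_lt (lt_of_lt_of_le hb (hp'.1 z h1))
    · rw [show PySem.List.insertBy (fun a b => decide (PySem.Str.lower a < PySem.Str.lower b)) x (y :: t)
          = y :: PySem.List.insertBy (fun a b => decide (PySem.Str.lower a < PySem.Str.lower b)) x t by
            simp [PySem.List.insertBy, hb]]
      refine List.pairwise_cons.mpr ⟨?_, ih hp'.2⟩
      intro z hz
      rcases (PySem.List.mem_insertBy _ _ _ _).mp hz with h1 | h1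
      · exact h1 ▸ le_of_not_gt hb
      · exact hp'.1 z h1

theorem pvFind_insertBy (k x : String) : ∀ (ys : List String),
    ys.Pairwise (fun a b => PySem.Str.lower a ≤ PySem.Str.lower b) →
    (PySem.List.insertBy (fun a b => decide (PySem.Str.lower a < PySem.Str.lower b)) x ys).find?
        (fun s => PySem.Str.lower s == k)
      = Option.or (ys.find? (fun s => PySem.Str.lower s == k))
          (if PySem.Str.lower x == k then some x else none) := by
  intro ys
  induction ys with
  | nil =>
    intro _
    by_cases h : PySem.Str.lower x = k
    · simp [PySem.List.insertBy, List.find?, h, Option.or]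
    · rw [show PySem.List.insertBy (fun a b => decide (PySem.Str.lower a < PySem.Str.lower b)) x [] = [x]
          from rfl,
        List.find?_cons_of_neg (by simp [h]), List.find?_nil,
        if_neg (by simp [h] : ¬(PySem.Str.lower x == k) = true)]
      rfl
  | cons y t ih =>
    intro hp
    have hp' := List.pairwise_cons.mp hp
    by_cases hb : PySem.Str.lower x < PySem.Str.lower y
    · rw [show PySem.List.insertBy (fun a b => decide (PySem.Str.lower a < PySem.Str.lower b)) x (y :: t)
          = x :: y :: t by simp [PySem.List.insertBy, hb]]
      by_cases hx : PySem.Str.lower x = k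
      · rw [List.find?_cons_of_pos (by simp [hx])]
        have hnone : (y :: t).find? (fun s => PySem.Str.lower s == k) = none := by
          apply pvFind_none_of_gt
          intro z hz
          rcases List.mem_cons.mp hz with h1 | h1
          · exact h1 ▸ hx ▸ hb
          · exact lt_of_lt_of_le (hx ▸ hb) (hp'.1 z h1)
        simp [hnone, hx, Option.or]
      · rw [List.find?_cons_of_neg (by simp [hx])]
        simp only [if_neg (by simp [hx] : ¬(PySem.Str.lower x == k) = true), Option.or_none]
    · rw [show PySem.List.insertBy (fun a b => decide (PySem.Str.lower a < PySem.Str.lower b)) x (y :: t)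
          = y :: PySem.List.insertBy (fun a b => decide (PySem.Str.lower a < PySem.Str.lower b)) x t by
            simp [PySem.List.insertBy, hb]]
      by_cases hy : PySem.Str.lower y = k
      · rw [List.find?_cons_of_pos (by simp [hy]), List.find?_cons_of_pos (by simp [hy])]
        simp
      · rw [List.find?_cons_of_neg (by simp [hy]), List.find?_cons_of_neg (by simp [hy])]
        exact ih hp'.2

theorem pvFind_foldl (k : String) : ∀ (l acc : List String),
    acc.Pairwise (fun a b => PySem.Str.lower a ≤ PySem.Str.lower b) →
    (l.foldl (fun acc x =>
        PySem.List.insertBy (fun a b => decide (PySem.Str.lower a < PySem.Str.lower b)) x acc) acc).find?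
        (fun s => PySem.Str.lower s == k)
      = Option.or (acc.find? (fun s => PySem.Str.lower s == k))
          (l.find? (fun s => PySem.Str.lower s == k)) := by
  intro l
  induction l with
  | nil => intro acc _; simp [Option.or]; cases acc.find? (fun s => PySem.Str.lower s == k) <;> simp [Option.or]
  | cons x t ih =>
    intro acc hacc
    rw [List.foldl_cons, ih _ (pvPairwise_insertBy x acc hacc), pvFind_insertBy k x acc hacc]
    by_cases hx : PySem.Str.lower x = k
    · rw [List.find?_cons_of_pos (by simp [hx])]
      cases acc.find? (fun s => PySem.Str.lower s == k) <;> simp [hx, Option.or]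
    · rw [List.find?_cons_of_neg (by simp [hx])]
      cases acc.find? (fun s => PySem.Str.lower s == k) <;> simp [hx, Option.or]

-- STABILITY: the first element with a given lowercase key is the same before and after sorting
theorem pvFind_sorted (k : String) (l : List String) :
    (PySem.List.sorted l (fun s => PySem.Str.lower s)).find? (fun s => PySem.Str.lower s == k)
      = l.find? (fun s => PySem.Str.lower s == k) := by
  rw [PySem.List.sorted_eq_foldl_insertBy l (fun s => PySem.Str.lower s),
      pvFind_foldl k l [] (by simp)]
  simp [Option.or]

-- B's adjacent-dedup on a key-sorted list is first-occurrence dedup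
theorem pvDedupGo_eq : ∀ (t : List String) (prev : String) (ks : List String),
    t.Pairwise (fun a b => PySem.Str.lower a ≤ PySem.Str.lower b) →
    (∀ y ∈ t, prev ≤ PySem.Str.lower y) →
    (∀ y ∈ t, (PySem.Str.lower y ∈ ks ↔ PySem.Str.lower y = prev)) →
    pvDedupGo (some prev) t = pvDdf ks t := by
  intro t
  induction t with
  | nil => intro _ _ _ _ _; simp [pvDedupGo, pvDdf]
  | cons x t ih =>
    intro prev ks hp hge hks
    have hp' := List.pairwise_cons.mp hp
    by_cases he : PySem.Str.lower x = prev
    · have hmem : PySem.Str.lower x ∈ ks := (hks x (List.mem_cons_self)).mpr he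
      rw [pvDedupGo, if_pos (by rw [he]), pvDdf, if_pos hmem]
      exact ih prev ks hp'.2 (fun y hy => hge y (List.mem_cons_of_mem _ hy))
        (fun y hy => hks y (List.mem_cons_of_mem _ hy))
    · have hmem : PySem.Str.lower x ∉ ks := fun h => he ((hks x List.mem_cons_self).mp h)
      rw [pvDedupGo, if_neg (by simpa using he), pvDdf, if_neg hmem]
      congr 1
      have hlt : prev < PySem.Str.lower x :=
        lt_of_le_of_ne (hge x List.mem_cons_self) (fun h => he h.symm)
      refine ih (PySem.Str.lower x) (ks ++ [PySem.Str.lower x]) hp'.2 (fun y hy => hp'.1 y hy) ?_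
      intro y hy
      constructor
      · intro hmem'
        rcases List.mem_append.mp hmem' with h1 | h1
        · have hey : PySem.Str.lower y = prev := (hks y (List.mem_cons_of_mem _ hy)).mp h1
          have hgt : prev < PySem.Str.lower y := lt_of_lt_of_le hlt (hp'.1 y hy)
          exact absurd hey (ne_of_gt hgt)
        · simpa using h1
      · intro h1; simp [h1]

theorem pvB_eq_ddf (cleaned : List String) :
    pvDedupGo none (PySem.List.sorted cleaned (fun x => PySem.Str.lower x))
      = pvDdf [] (PySem.List.sorted cleaned (fun x => PySem.Str.lower x)) := by
  have hp := PySem.List.sorted_pairwise cleaned (fun x => PySem.Str.lower x)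
  cases hs : PySem.List.sorted cleaned (fun x => PySem.Str.lower x) with
  | nil => simp [pvDedupGo, pvDdf]
  | cons x t =>
    rw [hs] at hp
    have hp' := List.pairwise_cons.mp hp
    rw [pvDedupGo, if_neg (by simp), pvDdf, if_neg (by simp)]
    congr 1
    exact pvDedupGo_eq t (PySem.Str.lower x) [PySem.Str.lower x] hp'.2
      (fun y hy => hp'.1 y hy) (fun y hy => by simp)

-- the two dedups are permutations of each other (same first representative per key)
theorem pvPerm (cleaned : List String) :
    (pvDdf [] (PySem.List.sorted cleaned (fun x => PySem.Str.lower x))).Perm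
      (pvDdf [] cleaned) := by
  have n1 : (pvDdf [] (PySem.List.sorted cleaned (fun x => PySem.Str.lower x))).Nodup :=
    (pvDdf_map_nodup _ []).of_map
  have n2 : (pvDdf [] cleaned).Nodup := (pvDdf_map_nodup cleaned []).of_map
  rw [List.perm_ext_iff_of_nodup n1 n2]
  intro x
  rw [pvMem_ddf, pvMem_ddf, pvFind_sorted]

-- ===== VERDICT (by name: the statement is the Claim_ definition above) =====
theorem normalize_db_list_spec : Claim_equal_normalize_db_list := by
  intro values _
  unfold Spec_normalize_db_list
  show normalize_db_list values = normalize_db_list_alt values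
  have hA : normalize_db_list values
      = PySem.List.sorted ((values.foldl pvStep (PySem.Set.empty, [])).2)
          (fun x => PySem.Str.lower x) := rfl
  have hB : normalize_db_list_alt values
      = pvDedupGo none (PySem.List.sorted (pvClean values) (fun x => PySem.Str.lower x)) := rfl
  rw [hA, hB, pvA_loop values PySem.Set.empty [], pvB_eq_ddf]
  simp only [List.nil_append]
  exact PySem.List.sorted_eq_of_perm_of_pairwise_lt _ _ _
    (pvPerm _)
    (pvDdf_pairwise_lt _ (PySem.List.sorted_pairwise _ _) [])
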